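-- pv_equiv track=rewrite | github.com/Mu-nah/gamebetV2 | tennis_predictor.py | _surface_from_tournament_name
-- ===== SOURCE A (Python) =====
-- def _surface_from_tournament_name(name: str) -> str:
--     n = (name or "").lower()
--     CLAY_KEYS  = ["roland","french","clay","madrid","rome","barcelona","prague",
--                   "bucharest","bogota","marrakech","istanbul","rabat","strasbourg",
--                   "parma","hamburg","warsaw","rouen","oeiras","estoril"]
--     GRASS_KEYS = ["wimbledon","grass","eastbourne","birmingham","bad homburg",
--                   "rosmalen","s-hertogenbosch","nottingham","berlin grass"]
--     IND_KEYS   = ["indoor","doha","dubai","abu dhabi","st. petersburg","linz",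
--                   "luxembourg","ostrava","guadalajara indoor"]
--     if any(k in n for k in CLAY_KEYS):  return "clay"
--     if any(k in n for k in GRASS_KEYS): return "grass"
--     if any(k in n for k in IND_KEYS):   return "indoors"
--     return "hard"
-- ===== SOURCE B (Python) =====
-- # Position-major single scan: walk the lowered name once; at each position record
-- # which surface groups have a keyword starting there; resolve priority at the end.
-- _CLAY_KEYS  = ["roland","french","clay","madrid","rome","barcelona","prague",
--                "bucharest","bogota","marrakech","istanbul","rabat","strasbourg",
--                "parma","hamburg","warsaw","rouen","oeiras","estoril"]
-- _GRASS_KEYS = ["wimbledon","grass","eastbourne","birmingham","bad homburg",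
--                "rosmalen","s-hertogenbosch","nottingham","berlin grass"]
-- _IND_KEYS   = ["indoor","doha","dubai","abu dhabi","st. petersburg","linz",
--                "luxembourg","ostrava","guadalajara indoor"]
--
-- def _surface_from_tournament_name(name: str) -> str:
--     n = (name or "").lower()
--     clay = grass = indoor = False
--     for i in range(len(n)):
--         tail = n[i:]
--         clay = clay or any(tail.startswith(k) for k in _CLAY_KEYS)
--         grass = grass or any(tail.startswith(k) for k in _GRASS_KEYS)
--         indoor = indoor or any(tail.startswith(k) for k in _IND_KEYS)
--     if clay:
--         return "clay"
--     if grass: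
--         return "grass"
--     if indoor:
--         return "indoors"
--     return "hard"
-- ===== Notes on version B (the rewrite author's own statement) =====
-- stated objective: alternative
-- what changed: Keyword-major nested any() scans replaced by a position-major single left-to-right scan of the name that accumulates per-surface match flags (a keyword starts at this position) and resolves the clay>grass>indoors priority once at the end.
import Mathlib
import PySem

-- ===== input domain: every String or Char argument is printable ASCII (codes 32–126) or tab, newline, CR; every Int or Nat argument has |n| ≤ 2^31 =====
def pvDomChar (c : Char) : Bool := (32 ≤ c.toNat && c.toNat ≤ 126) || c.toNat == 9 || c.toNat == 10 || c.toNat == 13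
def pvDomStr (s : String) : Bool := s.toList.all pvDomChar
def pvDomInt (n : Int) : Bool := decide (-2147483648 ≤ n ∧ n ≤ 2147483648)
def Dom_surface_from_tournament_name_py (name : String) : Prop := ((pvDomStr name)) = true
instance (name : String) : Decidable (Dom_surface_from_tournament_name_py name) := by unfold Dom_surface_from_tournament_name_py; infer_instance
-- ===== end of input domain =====

-- B replaces A's keyword-major any() scans by a position-major single scan of the name that
-- accumulates per-surface flags and resolves the clay>grass>indoors priority at the end.

-- ===== PORT A =====
def pvClayKeys : List String :=
  ["roland","french","clay","madrid","rome","barcelona","prague",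
   "bucharest","bogota","marrakech","istanbul","rabat","strasbourg",
   "parma","hamburg","warsaw","rouen","oeiras","estoril"]
def pvGrassKeys : List String :=
  ["wimbledon","grass","eastbourne","birmingham","bad homburg",
   "rosmalen","s-hertogenbosch","nottingham","berlin grass"]
def pvIndKeys : List String :=
  ["indoor","doha","dubai","abu dhabi","st. petersburg","linz",
   "luxembourg","ostrava","guadalajara indoor"]

def surface_from_tournament_name_py (name : String) : String :=
  let n := PySem.Str.lower name        -- (name or "").lower(): for a string, 'name or ""' is name
  if pvClayKeys.any (fun k => PySem.Str.isIn k n) then "clay"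
  else if pvGrassKeys.any (fun k => PySem.Str.isIn k n) then "grass"
  else if pvIndKeys.any (fun k => PySem.Str.isIn k n) then "indoors"
  else "hard"

-- ===== PORT B =====
def surface_from_tournament_name_py_alt (name : String) : String :=
  let n := (PySem.Str.lower name).toList
  let st := (PySem.List.pyRange 0 n.length 1).foldl
    (fun (s : Bool × Bool × Bool) i =>
      let tail := PySem.Chars.slice n (some i) none       -- n[i:]
      (s.1   || pvClayKeys.any  (fun k => PySem.Chars.startswith tail k.toList),
       s.2.1 || pvGrassKeys.any (fun k => PySem.Chars.startswith tail k.toList),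
       s.2.2 || pvIndKeys.any   (fun k => PySem.Chars.startswith tail k.toList)))
    (false, false, false)
  if st.1 then "clay"
  else if st.2.1 then "grass"
  else if st.2.2 then "indoors"
  else "hard"

-- ===== PRECONDITION & SPEC =====
def Spec_surface_from_tournament_name_py (name : String) (out : String) : Prop := out = surface_from_tournament_name_py_alt name
instance (name : String) (out : String) : Decidable (Spec_surface_from_tournament_name_py name out) := by unfold Spec_surface_from_tournament_name_py; infer_instance

-- ===== CLAIM (what is proved, stated in full; the proofs are below) =====
def Claim_equal_surface_from_tournament_name_py : Prop := ∀ (name : String), Dom_surface_from_tournament_name_py name → Spec_surface_from_tournament_name_py name (surface_from_tournament_name_py name)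

-- ===== LEMMAS AND PROOFS =====

-- the triple-flag fold is three independent any()'s
theorem foldl_triple_any {α : Type} (l : List α) (f g h : α → Bool) (a b c : Bool) :
    l.foldl (fun (s : Bool × Bool × Bool) i => (s.1 || f i, s.2.1 || g i, s.2.2 || h i)) (a, b, c)
      = (a || l.any f, b || l.any g, c || l.any h) := by
  induction l generalizing a b c with
  | nil => simp
  | cons x xs ih => simp [List.foldl_cons, ih, Bool.or_assoc]

-- "some keyword starts at some scanned position" = "some keyword is a substring" (keywords nonempty)
theorem posScan_eq_any_isIn (keys : List String) (hk : ∀ k ∈ keys, k.toList ≠ []) (n : List Char) :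
    ((List.range n.length).any fun j =>
        keys.any fun k => PySem.Chars.startswith (n.drop j) k.toList)
      = keys.any (fun k => PySem.Chars.isIn k.toList n) := by
  rw [Bool.eq_iff_iff]
  simp only [List.any_eq_true, List.mem_range, PySem.Chars.startswith_iff]
  constructor
  · rintro ⟨j, _, k, hkmem, hpre⟩
    exact ⟨k, hkmem, (PySem.Chars.exists_prefix_drop_iff_isIn _ _).1 ⟨j, hpre⟩⟩
  · rintro ⟨k, hkmem, hin⟩
    obtain ⟨j, hpre⟩ := (PySem.Chars.exists_prefix_drop_iff_isIn _ _).2 hin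
    by_cases hj : j < n.length
    · exact ⟨j, hj, k, hkmem, hpre⟩
    · exfalso
      have : n.drop j = [] := List.drop_eq_nil_of_le (by omega)
      rw [this, List.prefix_nil] at hpre
      exact hk k hkmem hpre

-- ===== VERDICT (by name: the statement is the Claim_ definition above) =====
theorem surface_from_tournament_name_py_spec : Claim_equal_surface_from_tournament_name_py := by
  intro name _
  unfold Spec_surface_from_tournament_name_py surface_from_tournament_name_py
    surface_from_tournament_name_py_alt
  simp only [PySem.List.pyRange_one, Int.sub_zero, Int.toNat_natCast, List.foldl_map, zero_add,
    PySem.Chars.slice_eq_listSlice, PySem.List.slice_from_natCast, foldl_triple_any,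
    posScan_eq_any_isIn pvClayKeys (by decide), posScan_eq_any_isIn pvGrassKeys (by decide),
    posScan_eq_any_isIn pvIndKeys (by decide)]
  simp [PySem.Str.isIn]
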